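-- pv_equiv track=rewrite | github.com/spartan289/PycharmProjects | kickstart2021/kickstart2022/newpassword.py | new_password
-- ===== SOURCE A (Python) =====
-- def new_password(n,s):
--     upf = False
--     lowf = False
--     digf = False
--     sp = False
--     character = ['#', '@', '*', '&']
--     for i in range(n):
--         if(s[i].isupper()):
--             upf = True
--         elif(s[i].islower()):
--             lowf = True
--         elif(s[i].isdigit()):
--             digf = True
--         elif(s[i] in character):
--             sp = True
--     if (not upf):
--         s += 'A'
--     if (not lowf):
--         s += 'a'
--     if (not digf):
--         s += '1'
--     if (not sp):
--         s += '#'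
--     while len(s) < 7:
--         s += '1'
--     return s
-- ===== SOURCE B (Python) =====
-- def new_password(n, s):
--     prefix = [s[i] for i in range(n)]
--     missing = ''.join(ch for present, ch in (
--         (any(c.isupper() for c in prefix), 'A'),
--         (any(c.islower() for c in prefix), 'a'),
--         (any(c.isdigit() for c in prefix), '1'),
--         (any(c in '#@*&' for c in prefix), '#'),
--     ) if not present)
--     t = s + missing
--     return t + '1' * (7 - len(t))
-- ===== Notes on version B (the rewrite author's own statement) =====
-- stated objective: idiomatic
-- what changed: Replaces the single elif-classifying loop by an eager prefix list plus four independent any() scans, builds the missing-class suffix with one join over flag/char pairs, and replaces the padding while-loop by a closed-form '1' * (7 - len(t)).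
import Mathlib
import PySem

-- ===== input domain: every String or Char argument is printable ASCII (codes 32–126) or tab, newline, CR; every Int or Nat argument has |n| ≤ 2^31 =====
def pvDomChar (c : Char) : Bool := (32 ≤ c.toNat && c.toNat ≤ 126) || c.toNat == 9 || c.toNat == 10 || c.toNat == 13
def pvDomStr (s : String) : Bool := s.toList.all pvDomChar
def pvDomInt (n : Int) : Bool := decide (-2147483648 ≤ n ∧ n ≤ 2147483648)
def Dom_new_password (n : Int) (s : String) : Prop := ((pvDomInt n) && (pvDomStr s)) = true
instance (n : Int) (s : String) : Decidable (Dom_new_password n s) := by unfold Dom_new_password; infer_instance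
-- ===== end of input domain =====

-- B replaces A's single elif-classifying loop by four independent `any` scans of the
-- first-n-characters list and replaces the padding while-loop by a closed-form repeat
-- (objective: more idiomatic decomposition; same exact return value).

-- ===== PORT A =====
-- A's while-loop `while len(s) < 7: s += '1'`
def padA (s : String) : String :=
  if s.toList.length < 7 then padA (s ++ "1") else s
termination_by 7 - s.toList.length
decreasing_by simp_all [String.toList_append]; omega

def new_password (n : Int) (s : String) : String :=
  let character : List Char := ['#', '@', '*', '&']
  let st := (PySem.List.pyRange 0 n 1).foldl
    (fun (st : Bool × Bool × Bool × Bool) i =>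
      let c := (PySem.Str.pyGet? s i).getD ' '   -- pyGet? = none only outside Pre_
      if PySem.Chars.isupper c then (true, st.2.1, st.2.2.1, st.2.2.2)
      else if PySem.Chars.islower c then (st.1, true, st.2.2.1, st.2.2.2)
      else if PySem.Chars.isdigit c then (st.1, st.2.1, true, st.2.2.2)
      else if c ∈ character then (st.1, st.2.1, st.2.2.1, true)
      else st)
    (false, false, false, false)
  let s1 := if !st.1 then s ++ "A" else s
  let s2 := if !st.2.1 then s1 ++ "a" else s1
  let s3 := if !st.2.2.1 then s2 ++ "1" else s2
  let s4 := if !st.2.2.2 then s3 ++ "#" else s3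
  padA s4

-- ===== PORT B =====
def new_password_alt (n : Int) (s : String) : String :=
  let pre : List Char := (PySem.List.pyRange 0 n 1).map
    (fun i => (PySem.Str.pyGet? s i).getD ' ')
  let missing : String := String.ofList
    (([(pre.any PySem.Chars.isupper, 'A'),
       (pre.any PySem.Chars.islower, 'a'),
       (pre.any PySem.Chars.isdigit, '1'),
       (pre.any (fun c => c ∈ "#@*&".toList), '#')]).filterMap
      (fun p => if p.1 then none else some p.2))
  let t := s ++ missing
  t ++ String.ofList (List.replicate (7 - t.toList.length) '1')

-- ===== PRECONDITION & SPEC =====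
-- Pre_ excludes exactly the inputs where A raises IndexError (s[i] with n > len(s)).
def Pre_new_password (n : Int) (s : String) : Prop := n ≤ (s.toList.length : Int)
instance (n : Int) (s : String) : Decidable (Pre_new_password n s) := by
  unfold Pre_new_password; infer_instance
def pvWitness_new_password : Int × String := (3, "Ab1")

def Spec_new_password (n : Int) (s : String) (out : String) : Prop := out = new_password_alt n s
instance (n : Int) (s : String) (out : String) : Decidable (Spec_new_password n s out) := by unfold Spec_new_password; infer_instance

-- ===== CLAIM (what is proved, stated in full; the proofs are below) =====
def Claim_equal_new_password : Prop := ∀ (n : Int) (s : String), Dom_new_password n s → Pre_new_password n s → Spec_new_password n s (new_password n s)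

-- ===== LEMMAS AND PROOFS =====

lemma pv_up_low (c : Char) (h : PySem.Chars.isupper c = true) : PySem.Chars.islower c = false := by
  simp [PySem.Chars.isupper, PySem.Chars.islower, Char.le_def, UInt32.le_iff_toNat_le] at *; omega

lemma pv_up_dig (c : Char) (h : PySem.Chars.isupper c = true) : PySem.Chars.isdigit c = false := by
  simp [PySem.Chars.isupper, PySem.Chars.isdigit, Char.le_def, UInt32.le_iff_toNat_le] at *; omega

lemma pv_up_mem (c : Char) (h : PySem.Chars.isupper c = true) :
    (decide (c = '#') || (decide (c = '@') || (decide (c = '*') || decide (c = '&')))) = false := by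
  simp [PySem.Chars.isupper, Char.le_def, UInt32.le_iff_toNat_le] at *
  refine ⟨?_,?_,?_,?_⟩ <;> rintro rfl <;> simp_all

lemma pv_low_dig (c : Char) (h : PySem.Chars.islower c = true) : PySem.Chars.isdigit c = false := by
  simp [PySem.Chars.islower, PySem.Chars.isdigit, Char.le_def, UInt32.le_iff_toNat_le] at *; omega

lemma pv_low_mem (c : Char) (h : PySem.Chars.islower c = true) :
    (decide (c = '#') || (decide (c = '@') || (decide (c = '*') || decide (c = '&')))) = false := by
  simp [PySem.Chars.islower, Char.le_def, UInt32.le_iff_toNat_le] at *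
  refine ⟨?_,?_,?_,?_⟩ <;> rintro rfl <;> simp_all

lemma pv_dig_mem (c : Char) (h : PySem.Chars.isdigit c = true) :
    (decide (c = '#') || (decide (c = '@') || (decide (c = '*') || decide (c = '&')))) = false := by
  simp [PySem.Chars.isdigit, Char.le_def, UInt32.le_iff_toNat_le] at *
  refine ⟨?_,?_,?_,?_⟩ <;> rintro rfl <;> simp_all

-- the elif chain, rewritten componentwise (chars fall in at most one class)
lemma pvStep_or (st : Bool × Bool × Bool × Bool) (c : Char) :
    (if PySem.Chars.isupper c then (true, st.2.1, st.2.2.1, st.2.2.2)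
     else if PySem.Chars.islower c then (st.1, true, st.2.2.1, st.2.2.2)
     else if PySem.Chars.isdigit c then (st.1, st.2.1, true, st.2.2.2)
     else if c ∈ ['#','@','*','&'] then (st.1, st.2.1, st.2.2.1, true)
     else st)
    = (st.1 || PySem.Chars.isupper c, st.2.1 || PySem.Chars.islower c,
       st.2.2.1 || PySem.Chars.isdigit c, st.2.2.2 || decide (c ∈ ['#','@','*','&'])) := by
  split_ifs with h1 h2 h3 h4
  · simp [h1, pv_up_low c h1, pv_up_dig c h1, pv_up_mem c h1]
  · simp [h1, h2, pv_low_dig c h2, pv_low_mem c h2]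
  · simp [h1, h2, h3, pv_dig_mem c h3]
  · simp [h1, h2, h3, h4]
  · simp [h1, h2, h3, h4]

lemma pvFold {α : Type} (l : List α) (f : α → Char) (u lo d sp : Bool) :
    l.foldl (fun st x => (st.1 || PySem.Chars.isupper (f x), st.2.1 || PySem.Chars.islower (f x),
        st.2.2.1 || PySem.Chars.isdigit (f x), st.2.2.2 || decide (f x ∈ ['#','@','*','&'])))
      (u, lo, d, sp)
    = (u || (l.map f).any PySem.Chars.isupper, lo || (l.map f).any PySem.Chars.islower,
       d || (l.map f).any PySem.Chars.isdigit,
       sp || (l.map f).any (fun c => decide (c ∈ ['#','@','*','&']))) := by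
  induction l generalizing u lo d sp with
  | nil => simp
  | cons x l ih => rw [List.foldl_cons, ih]; simp [Bool.or_assoc]

lemma padA_eq (t : String) :
    padA t = t ++ String.ofList (List.replicate (7 - t.toList.length) '1') := by
  fun_induction padA t with
  | case1 t h ih =>
    rw [ih]
    apply String.toList_inj.mp
    rw [String.length_toList] at h
    have h7 : 7 - t.length = (6 - t.length) + 1 := by omega
    simp [h7, List.replicate_succ]
  | case2 t h =>
    apply String.toList_inj.mp
    have h7 : 7 - t.length = 0 := by rw [← String.length_toList]; omega
    simp [h7]

-- ===== VERDICT (by name: the statement is the Claim_ definition above) =====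
theorem new_password_spec : Claim_equal_new_password := by
  intro n s hdom hpre
  unfold Spec_new_password new_password new_password_alt
  have hstr : ("#@*&".toList) = ['#','@','*','&'] := by decide
  simp only [hstr, pvStep_or]
  rw [pvFold]
  simp only [Bool.false_or]
  cases hu : ((PySem.List.pyRange 0 n 1).map (fun i => (PySem.Str.pyGet? s i).getD ' ')).any PySem.Chars.isupper <;>
  cases hlo : ((PySem.List.pyRange 0 n 1).map (fun i => (PySem.Str.pyGet? s i).getD ' ')).any PySem.Chars.islower <;>
  cases hd : ((PySem.List.pyRange 0 n 1).map (fun i => (PySem.Str.pyGet? s i).getD ' ')).any PySem.Chars.isdigit <;>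
  cases hsp : ((PySem.List.pyRange 0 n 1).map (fun i => (PySem.Str.pyGet? s i).getD ' ')).any (fun c => decide (c ∈ ['#','@','*','&'])) <;>
    (simp only [Bool.not_true, Bool.not_false, if_true, List.filterMap]
     rw [padA_eq]
     apply String.toList_inj.mp
     simp [String.toList_append, String.toList_ofList, List.append_assoc])
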